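-- pv_equiv track=rewrite | github.com/JHull1234/SGM-Builder | simplified_ai.py | _get_teammate_pairs
-- ===== SOURCE A (Python) =====
-- from typing import Dict, List, Optional, Tuple
--
-- def _get_teammate_pairs(players: List[str]) -> List[Tuple]:
--     """Get teammate pairs"""
--     teams = {
--         "Clayton Oliver": "Melbourne", "Christian Petracca": "Melbourne",
--         "Marcus Bontempelli": "Western Bulldogs", "Adam Treloar": "Western Bulldogs",
--         "Jeremy Cameron": "Geelong", "Tom Hawkins": "Geelong"
--     }
--
--     pairs = []
--     for i, p1 in enumerate(players):
--         for p2 in players[i+1:]: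
--             if teams.get(p1) == teams.get(p2) and teams.get(p1):
--                 pairs.append((p1, p2))
--
--     return pairs
-- ===== SOURCE B (Python) =====
-- from typing import Dict, List, Optional, Tuple
--
-- def _get_teammate_pairs(players: List[str]) -> List[Tuple]:
--     """Get teammate pairs — group players by team once, then for each player
--     pair it with the later same-team players of its group (O(n + output))."""
--     teams = {
--         "Clayton Oliver": "Melbourne", "Christian Petracca": "Melbourne",
--         "Marcus Bontempelli": "Western Bulldogs", "Adam Treloar": "Western Bulldogs",
--         "Jeremy Cameron": "Geelong", "Tom Hawkins": "Geelong"
--     }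
--     groups = {}
--     for p in players:
--         t = teams.get(p)
--         if t is not None:
--             groups.setdefault(t, []).append(p)
--     taken = {}
--     pairs = []
--     for p in players:
--         t = teams.get(p)
--         if t is not None:
--             k = taken.get(t, 0) + 1
--             taken[t] = k
--             for q in groups.get(t, [])[k:]:
--                 pairs.append((p, q))
--     return pairs
-- ===== Notes on version B (the rewrite author's own statement) =====
-- stated objective: faster
-- what changed: Replaced the all-pairs double scan with a single grouping pass (team -> players) plus one pass that pairs each player with the later members of its own group.
import Mathlib
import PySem

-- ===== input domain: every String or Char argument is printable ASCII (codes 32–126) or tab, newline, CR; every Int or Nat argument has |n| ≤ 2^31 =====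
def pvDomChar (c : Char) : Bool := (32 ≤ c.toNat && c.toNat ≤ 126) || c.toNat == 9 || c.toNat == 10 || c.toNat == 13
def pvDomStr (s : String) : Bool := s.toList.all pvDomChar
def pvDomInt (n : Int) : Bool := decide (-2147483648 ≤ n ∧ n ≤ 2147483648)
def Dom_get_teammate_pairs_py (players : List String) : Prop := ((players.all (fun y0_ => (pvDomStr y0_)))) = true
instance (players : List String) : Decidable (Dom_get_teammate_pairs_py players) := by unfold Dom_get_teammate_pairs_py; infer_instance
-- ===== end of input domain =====

-- B groups the players by team in one pass and pairs each player with the later members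
-- of its own group, instead of A's all-pairs double scan; same return value (alternative/faster).

-- the fixed teams dict of the Python source (shared literal of both programs)
def pvTeams : PySem.Dict String String := PySem.Dict.ofList
  [("Clayton Oliver", "Melbourne"), ("Christian Petracca", "Melbourne"),
   ("Marcus Bontempelli", "Western Bulldogs"), ("Adam Treloar", "Western Bulldogs"),
   ("Jeremy Cameron", "Geelong"), ("Tom Hawkins", "Geelong")]

-- ===== PORT A =====
def get_teammate_pairs_py (players : List String) : List (String × String) :=
  (PySem.List.enumerate players).foldl (fun pairs ip =>
    (PySem.List.slice players (some (ip.1 + 1)) none).foldl (fun pairs p2 =>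
      if pvTeams.get? ip.2 = pvTeams.get? p2 ∧ (pvTeams.get? ip.2).getD "" ≠ "" then
        pairs ++ [(ip.2, p2)]
      else pairs) pairs) []

-- ===== PORT B =====
def get_teammate_pairs_py_alt (players : List String) : List (String × String) :=
  let groups : PySem.Dict String (List String) := players.foldl (fun g p =>
    match pvTeams.get? p with
    | some t => g.modify t [] (fun l => l ++ [p])
    | none => g) PySem.Dict.empty
  (players.foldl (fun st p =>
    match pvTeams.get? p with
    | some t =>
      let k : Int := st.1.getD t 0 + 1
      (st.1.insert t k,
       st.2 ++ (PySem.List.slice (groups.getD t []) (some k) none).map (fun q => (p, q)))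
    | none => st) ((PySem.Dict.empty : PySem.Dict String Int), [])).2

-- ===== PRECONDITION & SPEC =====
def Spec_get_teammate_pairs_py (players : List String) (out : List (String × String)) : Prop := out = get_teammate_pairs_py_alt players
instance (players : List String) (out : List (String × String)) : Decidable (Spec_get_teammate_pairs_py players out) := by unfold Spec_get_teammate_pairs_py; infer_instance

-- ===== CLAIM (what is proved, stated in full; the proofs are below) =====
def Claim_equal_get_teammate_pairs_py : Prop := ∀ (players : List String), Dom_get_teammate_pairs_py players → Spec_get_teammate_pairs_py players (get_teammate_pairs_py players)

-- ===== LEMMAS AND PROOFS =====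

-- condition of A's inner test, and the per-team group both proofs use
abbrev pvCond (x q : String) : Prop :=
  pvTeams.get? x = pvTeams.get? q ∧ (pvTeams.get? x).getD "" ≠ ""

def pvByTeam (t : String) (ps : List String) : List String :=
  ps.filter (fun q => decide (pvTeams.get? q = some t))

-- canonical form both programs are proved equal to
def pvF : List String → List (String × String)
  | [] => []
  | p :: rest =>
    (match pvTeams.get? p with
     | some t => (pvByTeam t rest).map (fun q => (p, q))
     | none => []) ++ pvF rest

theorem pvTeams_mk : pvTeams = PySem.Dict.mk
    [("Clayton Oliver", "Melbourne"), ("Christian Petracca", "Melbourne"),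
     ("Marcus Bontempelli", "Western Bulldogs"), ("Adam Treloar", "Western Bulldogs"),
     ("Jeremy Cameron", "Geelong"), ("Tom Hawkins", "Geelong")] := by decide

theorem pvTeams_ne_empty (p t : String) (h : pvTeams.get? p = some t) : t ≠ "" := by
  rw [pvTeams_mk] at h
  simp only [PySem.Dict.get?_mk_cons] at h
  split_ifs at h <;> simp_all [PySem.Dict.get?] <;> subst h <;> decide

-- A's inner loop appends the filtered tail
theorem inner_eq (x : String) (ys : List String) (pairs : List (String × String)) :
    ys.foldl (fun pairs p2 =>
        if pvTeams.get? x = pvTeams.get? p2 ∧ (pvTeams.get? x).getD "" ≠ "" then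
          pairs ++ [(x, p2)] else pairs) pairs
      = pairs ++ (ys.filter (fun q => decide (pvCond x q))).map (fun q => (x, q)) := by
  induction ys generalizing pairs with
  | nil => simp
  | cons y ys ih =>
    simp only [List.foldl_cons]
    by_cases h : pvCond x y
    · rw [if_pos h, ih, List.filter_cons, if_pos (by simpa using h)]
      simp
    · rw [if_neg h, ih, List.filter_cons, if_neg (by simpa using h)]

theorem filter_cond_none (x : String) (ys : List String) (h : pvTeams.get? x = none) :
    ys.filter (fun q => decide (pvCond x q)) = [] := by
  rw [List.filter_eq_nil_iff.mpr]
  intro q _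
  simp [pvCond, h]

theorem filter_cond_some (x : String) (ys : List String) (t : String)
    (h : pvTeams.get? x = some t) :
    ys.filter (fun q => decide (pvCond x q)) = pvByTeam t ys := by
  unfold pvByTeam
  apply List.filter_congr
  intro q _
  simp only [pvCond, h, decide_eq_decide]
  have ht := pvTeams_ne_empty x t h
  constructor
  · rintro ⟨h1, _⟩; exact h1.symm
  · intro h1; simp [h1, ht]

theorem pvF_cons_none (x : String) (rest : List String) (h : pvTeams.get? x = none) :
    pvF (x :: rest) = pvF rest := by
  simp [pvF, h]

theorem pvF_cons_some (x : String) (rest : List String) (t : String)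
    (h : pvTeams.get? x = some t) :
    pvF (x :: rest) = (pvByTeam t rest).map (fun q => (x, q)) ++ pvF rest := by
  simp [pvF, h]

theorem flat_key (full : List String) (ys : List String) (n : Nat) (hdrop : full.drop n = ys) :
    (PySem.List.enumerate ys (n : Int)).flatMap (fun ip =>
        ((PySem.List.slice full (some (ip.1 + 1)) none).filter
            (fun q => decide (pvCond ip.2 q))).map (fun q => (ip.2, q)))
      = pvF ys := by
  induction ys generalizing n with
  | nil => simp [PySem.List.enumerate, pvF]
  | cons x ys ih =>
    rw [PySem.List.enumerate_cons]
    simp only [List.flatMap_cons]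
    have htail : full.drop (n + 1) = ys := by
      rw [← List.drop_drop, hdrop]
      rfl
    rw [show ((n : Int) + 1) = ((n + 1 : Nat) : Int) by push_cast; ring,
        PySem.List.slice_from_natCast, htail, ih (n + 1) htail]
    rcases Option.eq_none_or_eq_some (pvTeams.get? x) with h | ⟨t, h⟩
    · rw [filter_cond_none x ys h, pvF_cons_none x ys h]
      simp
    · rw [filter_cond_some x ys t h, pvF_cons_some x ys t h]

theorem A_eq_F (players : List String) : get_teammate_pairs_py players = pvF players := by
  unfold get_teammate_pairs_py
  have hstep : ∀ (pairs : List (String × String)) (ip : Int × String),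
      (PySem.List.slice players (some (ip.1 + 1)) none).foldl (fun pairs p2 =>
        if pvTeams.get? ip.2 = pvTeams.get? p2 ∧ (pvTeams.get? ip.2).getD "" ≠ "" then
          pairs ++ [(ip.2, p2)] else pairs) pairs
      = pairs ++ ((PySem.List.slice players (some (ip.1 + 1)) none).filter
          (fun q => decide (pvCond ip.2 q))).map (fun q => (ip.2, q)) :=
    fun pairs ip => inner_eq ip.2 _ pairs
  simp only [hstep]
  rw [PySem.List.foldl_append_eq_flatMap]
  simpa using flat_key players players 0 rfl

-- B's first loop builds exactly the per-team groups
theorem groups_getD (ps : List String) (g : PySem.Dict String (List String)) (t : String) :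
    (ps.foldl (fun g p =>
        match pvTeams.get? p with
        | some t => g.modify t [] (fun l => l ++ [p])
        | none => g) g).getD t []
      = g.getD t [] ++ pvByTeam t ps := by
  induction ps generalizing g with
  | nil => simp [pvByTeam]
  | cons x xs ih =>
    simp only [List.foldl_cons, pvByTeam, List.filter_cons]
    cases h : pvTeams.get? x with
    | none => simp [ih, pvByTeam]
    | some t' =>
      rw [ih, PySem.Dict.getD_modify]
      by_cases ht : t = t'
      · subst ht; simp [pvByTeam]
      · simp [ht, pvByTeam, Ne.symm ht]

-- B's second loop, with the per-team positions as invariant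
theorem loop2 (groups : PySem.Dict String (List String)) (full : List String)
    (hG : ∀ t, groups.getD t [] = pvByTeam t full) :
    ∀ (xs pre : List String), pre ++ xs = full →
    ∀ (taken : PySem.Dict String Int) (pairs : List (String × String)),
    (∀ t, taken.getD t 0 = ((pvByTeam t pre).length : Int)) →
    (xs.foldl (fun st p =>
        match pvTeams.get? p with
        | some t =>
          let k : Int := st.1.getD t 0 + 1
          (st.1.insert t k,
           st.2 ++ (PySem.List.slice (groups.getD t []) (some k) none).map (fun q => (p, q)))
        | none => st) (taken, pairs)).2 = pairs ++ pvF xs := by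
  intro xs
  induction xs with
  | nil => intro pre _ taken pairs _; simp [pvF]
  | cons x xs ih =>
    intro pre hfull taken pairs htaken
    simp only [List.foldl_cons]
    cases h : pvTeams.get? x with
    | none =>
      rw [ih (pre ++ [x]) (by simpa using hfull) taken pairs ?_]
      · simp [pvF, h]
      · intro t
        rw [htaken t]
        congr 1
        simp [pvByTeam, List.filter_append, h]
    | some t =>
      have hk : taken.getD t 0 + 1 = (((pvByTeam t pre).length + 1 : Nat) : Int) := by
        rw [htaken t]; push_cast; ring
      have hslice : PySem.List.slice (groups.getD t []) (some (taken.getD t 0 + 1)) none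
          = (groups.getD t []).drop ((pvByTeam t pre).length + 1) := by
        rw [hk, PySem.List.slice_from_natCast]
      have hgroup : (groups.getD t []).drop ((pvByTeam t pre).length + 1) = pvByTeam t xs := by
        rw [hG t, ← hfull]
        simp only [pvByTeam, List.filter_append, List.filter_cons]
        have hx : pvTeams.get? x = some t := h
        simp [hx, List.drop_append]
      rw [ih (pre ++ [x]) (by simpa using hfull) _ _ ?_]
      · rw [hslice, hgroup]
        simp [pvF, h]
      · intro t'
        rw [PySem.Dict.getD_insert]
        by_cases ht : t' = t
        · subst ht
          rw [if_pos rfl, hk]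
          congr 2
          simp [pvByTeam, List.filter_append, h]
        · rw [if_neg ht, htaken t']
          congr 1
          have hx : ¬ (pvTeams.get? x = some t') := by simp [h]; exact fun hh => ht hh.symm
          simp [pvByTeam, List.filter_append, hx]

theorem B_eq_F (players : List String) : get_teammate_pairs_py_alt players = pvF players := by
  unfold get_teammate_pairs_py_alt
  refine (loop2 _ players ?_ players [] rfl PySem.Dict.empty [] ?_).trans (by simp)
  · intro t
    rw [groups_getD]
    simp
  · intro t
    simp [PySem.Dict.getD_empty, pvByTeam]

-- ===== VERDICT (by name: the statement is the Claim_ definition above) =====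
theorem get_teammate_pairs_py_spec : Claim_equal_get_teammate_pairs_py := by
  intro players _
  unfold Spec_get_teammate_pairs_py
  rw [A_eq_F, B_eq_F]
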